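-- pv_equiv track=rewrite | github.com/HOMEFTW/AndgateTechnology | tools/generate_refined.py | replace_row_chars
-- ===== SOURCE A (Python) =====
-- def replace_row_chars(z_plane, z, updates, protected=None):
--     """在指定行上按坐标写入字符。"""
--     if z is None or not (0 <= z < len(z_plane)):
--         return z_plane
--
--     protected = protected or set()
--     row = list(z_plane[z])
--     for x, ch in updates.items():
--         if 0 <= x < len(row) and row[x] not in protected and row[x] != ' ':
--             row[x] = ch
--     z_plane[z] = "".join(row)
--     return z_plane
-- ===== SOURCE B (Python) =====
-- def replace_row_chars(z_plane, z, updates, protected=None):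
--     """在指定行上按坐标写入字符。"""
--     if z is None or not (0 <= z < len(z_plane)):
--         return z_plane
--     protected = protected or set()
--     z_plane[z] = "".join(
--         updates[x] if (x in updates and c not in protected and c != ' ') else c
--         for x, c in enumerate(z_plane[z])
--     )
--     return z_plane
-- ===== Notes on version B (the rewrite author's own statement) =====
-- stated objective: idiomatic
-- what changed: A loops over the updates dict and mutates a list of characters in place by index; B makes a single left-to-right pass over the row's characters with enumerate and builds the new row in one join, doing a dict lookup per position instead of writing into the row.
import Mathlib
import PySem

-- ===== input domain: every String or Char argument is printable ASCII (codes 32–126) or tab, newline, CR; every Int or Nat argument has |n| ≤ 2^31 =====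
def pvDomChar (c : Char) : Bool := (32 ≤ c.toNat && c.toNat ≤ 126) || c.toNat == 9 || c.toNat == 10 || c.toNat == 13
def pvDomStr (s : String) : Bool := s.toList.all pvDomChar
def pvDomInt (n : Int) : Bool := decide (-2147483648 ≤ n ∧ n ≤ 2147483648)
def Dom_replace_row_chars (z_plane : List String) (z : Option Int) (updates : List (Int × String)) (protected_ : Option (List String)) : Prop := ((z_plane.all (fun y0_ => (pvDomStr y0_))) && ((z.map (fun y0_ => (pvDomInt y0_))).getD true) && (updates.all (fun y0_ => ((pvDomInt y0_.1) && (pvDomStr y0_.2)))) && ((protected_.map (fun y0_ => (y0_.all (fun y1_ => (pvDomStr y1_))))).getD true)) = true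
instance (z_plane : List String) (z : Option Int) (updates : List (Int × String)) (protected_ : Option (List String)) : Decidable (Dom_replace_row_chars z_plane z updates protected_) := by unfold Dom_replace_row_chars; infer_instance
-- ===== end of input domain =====

-- B replaces A's loop over the updates dict (mutating a char list in place) by a single
-- left-to-right pass over the row with a dict lookup per position (idiomatic; same cost).
-- Both A and B mutate z_plane[z] in place identically; the theorems are about the return value.

-- ===== PORT A =====
-- one iteration of A's `for x, ch in updates.items()` loop body
def pvStepA (prot : List String) (row : List String) (p : Int × String) : List String :=
  if 0 ≤ p.1 ∧ p.1 < (row.length : Int) ∧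
      ¬ prot.contains (row.getD p.1.toNat "") ∧ row.getD p.1.toNat "" ≠ " "
  then row.set p.1.toNat p.2 else row

def replace_row_chars (z_plane : List String) (z : Option Int) (updates : List (Int × String)) (protected_ : Option (List String)) : List String :=
  match z with
  | none => z_plane
  | some zi =>
    if ¬ (0 ≤ zi ∧ zi < (z_plane.length : Int)) then z_plane
    else
      -- `protected = protected or set()`
      let prot : List String := match protected_ with
        | some p => if p ≠ [] then p else []
        | none => []
      -- `row = list(z_plane[z])` : a list of one-character strings
      let row0 : List String := (z_plane.getD zi.toNat "").toList.map (fun c => String.ofList [c])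
      let row := updates.foldl (pvStepA prot) row0
      z_plane.set zi.toNat (String.join row)

-- ===== PORT B =====
def replace_row_chars_alt (z_plane : List String) (z : Option Int) (updates : List (Int × String)) (protected_ : Option (List String)) : List String :=
  match z with
  | none => z_plane
  | some zi =>
    if ¬ (0 ≤ zi ∧ zi < (z_plane.length : Int)) then z_plane
    else
      let prot : List String := match protected_ with
        | some p => if p ≠ [] then p else []
        | none => []
      let newRow : String := String.join
        ((PySem.List.enumerate ((z_plane.getD zi.toNat "").toList)).map (fun xc =>
          match (PySem.Dict.mk updates).get? xc.1 with
          | some ch =>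
            if ¬ prot.contains (String.ofList [xc.2]) ∧ String.ofList [xc.2] ≠ " " then ch
            else String.ofList [xc.2]
          | none => String.ofList [xc.2]))
      z_plane.set zi.toNat newRow

-- ===== PRECONDITION & SPEC =====
-- Pre_ excludes updates lists with duplicate keys: such a list is not the association-list
-- image of any Python dict (Python collapses duplicate keys before A ever runs), so A's
-- behaviour on it is undefined by the source program.
def Pre_replace_row_chars (z_plane : List String) (z : Option Int) (updates : List (Int × String)) (protected_ : Option (List String)) : Prop :=
  (updates.map Prod.fst).Nodup
instance (z_plane : List String) (z : Option Int) (updates : List (Int × String)) (protected_ : Option (List String)) : Decidable (Pre_replace_row_chars z_plane z updates protected_) := by unfold Pre_replace_row_chars; infer_instance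

def pvWitness_replace_row_chars : List String × Option Int × (List (Int × String)) × Option (List String) :=
  (["ab c", " x"], some 0, [(0, "X"), (3, "Y")], some ["b"])

def Spec_replace_row_chars (z_plane : List String) (z : Option Int) (updates : List (Int × String)) (protected_ : Option (List String)) (out : List String) : Prop := out = replace_row_chars_alt z_plane z updates protected_
instance (z_plane : List String) (z : Option Int) (updates : List (Int × String)) (protected_ : Option (List String)) (out : List String) : Decidable (Spec_replace_row_chars z_plane z updates protected_ out) := by unfold Spec_replace_row_chars; infer_instance

-- ===== CLAIM (what is proved, stated in full; the proofs are below) =====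
def Claim_equal_replace_row_chars : Prop := ∀ (z_plane : List String) (z : Option Int) (updates : List (Int × String)) (protected_ : Option (List String)), Dom_replace_row_chars z_plane z updates protected_ → Pre_replace_row_chars z_plane z updates protected_ → Spec_replace_row_chars z_plane z updates protected_ (replace_row_chars z_plane z updates protected_)

-- ===== LEMMAS AND PROOFS =====

-- what B computes at position i on character-string a, as a function of the index
def pvApply (updates : List (Int × String)) (prot : List String) (i : Int) (a : String) : String :=
  match (PySem.Dict.mk updates).get? i with
  | some ch => if ¬ prot.contains a ∧ a ≠ " " then ch else a
  | none => a

theorem pvStepA_length (prot : List String) (row : List String) (p : Int × String) :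
    (pvStepA prot row p).length = row.length := by
  unfold pvStepA; split <;> simp

-- A's fold over the updates equals B's positionwise map, given unique keys
theorem pvFold_eq_mapIdx (prot : List String) (ups : List (Int × String)) :
    ∀ row : List String, (ups.map Prod.fst).Nodup →
      ups.foldl (pvStepA prot) row = row.mapIdx (fun i a => pvApply ups prot (i : Int) a) := by
  induction ups with
  | nil =>
    intro row _
    apply List.ext_getElem (by simp)
    intro i h1 h2
    simp [pvApply, PySem.Dict.get?]
  | cons p ups ih =>
    intro row hnd
    obtain ⟨x, ch⟩ := p
    simp only [List.map_cons, List.nodup_cons] at hnd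
    obtain ⟨hx, hnd⟩ := hnd
    have hxnone : (PySem.Dict.mk ups).get? x = none := by
      rw [PySem.Dict.get?_eq_none_iff_not_mem_keys]
      simpa [PySem.Dict.keys] using hx
    rw [List.foldl_cons, ih _ hnd]
    apply List.ext_getElem (by simp [pvStepA_length])
    intro i h1 h2
    have h1' : i < (pvStepA prot row (x, ch)).length := by simpa using h1
    have hlen : i < row.length := by simpa [pvStepA_length] using h1'
    simp only [List.getElem_mapIdx]
    by_cases hxi : x = (i : Int)
    · -- the cons entry targets exactly position i
      have hge : 0 ≤ x := by omega
      have htn : x.toNat = i := by omega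
      have hlt : x < (row.length : Int) := by omega
      have hnone : (PySem.Dict.mk ups).get? (i : Int) = none := hxi ▸ hxnone
      have hrowx : row.getD x.toNat "" = row[i] := by
        rw [htn]; exact List.getD_eq_getElem row "" hlen
      by_cases hg : ¬ prot.contains row[i] = true ∧ row[i] ≠ " "
      · have hstep : pvStepA prot row (x, ch) = row.set i ch := by
          unfold pvStepA
          rw [if_pos ⟨hge, hlt, by rw [hrowx]; exact hg.1, by rw [hrowx]; exact hg.2⟩, htn]
        have hm : row[i] ∉ prot := by simpa using hg.1
        simp only [hstep]
        simp [pvApply, PySem.Dict.get?_mk_cons, hnone, hxi, hg.2, hm]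
      · have hstep : pvStepA prot row (x, ch) = row := by
          unfold pvStepA
          rw [if_neg]
          intro hc
          exact hg ⟨by rw [← hrowx]; exact hc.2.2.1, by rw [← hrowx]; exact hc.2.2.2⟩
        simp only [hstep]
        simp only [pvApply, PySem.Dict.get?_mk_cons, hnone, hxi, beq_self_eq_true, if_true]
        rw [if_neg hg]
    · -- the cons entry leaves position i alone
      have hstep : (pvStepA prot row (x, ch))[i]'h1' = row[i]'hlen := by
        unfold pvStepA
        split
        · next hc =>
          have hne : x.toNat ≠ i := by
            have := hc.1; omega
          simp [List.getElem_set_ne hne]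
        · rfl
      simp only [hstep]
      unfold pvApply
      rw [PySem.Dict.get?_mk_cons]
      simp [show ¬ ((x == (i : Int)) = true) from by simpa using hxi]

-- bridge: B's pass over enumerate(chars) is the mapIdx over A's initial row of 1-char strings
theorem pvEnum_bridge (updates : List (Int × String)) (prot : List String) (l : List Char) :
    (PySem.List.enumerate l).map (fun xc =>
        match (PySem.Dict.mk updates).get? xc.1 with
        | some ch =>
          if ¬ prot.contains (String.ofList [xc.2]) ∧ String.ofList [xc.2] ≠ " " then ch
          else String.ofList [xc.2]
        | none => String.ofList [xc.2])
      = (l.map (fun c => String.ofList [c])).mapIdx (fun i a => pvApply updates prot (i : Int) a) := by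
  apply List.ext_getElem (by simp [PySem.List.length_enumerate])
  intro i h1 h2
  simp [PySem.List.getElem_enumerate, pvApply]

-- ===== VERDICT (by name: the statement is the Claim_ definition above) =====
theorem replace_row_chars_spec : Claim_equal_replace_row_chars := by
  intro z_plane z updates protected_ _ hpre
  have hnd : (updates.map Prod.fst).Nodup := hpre
  unfold Spec_replace_row_chars replace_row_chars replace_row_chars_alt
  cases z with
  | none => rfl
  | some zi =>
    by_cases h : ¬ (0 ≤ zi ∧ zi < (z_plane.length : Int))
    · simp only [if_pos h]
    · simp only [if_neg h]
      rw [pvEnum_bridge updates _ ((z_plane.getD zi.toNat "").toList)]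
      rw [pvFold_eq_mapIdx _ updates _ hnd]
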